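-- pv_equiv track=rewrite | github.com/qszy1210/skills | table-structure-detector/scripts/detectors/format_change.py | _is_zebra
-- ===== SOURCE A (Python) =====
-- def _is_zebra(current_fmt: dict, history: list[dict]) -> bool:
--     """检测是否为斑马纹（交替行底色）"""
--     if len(history) < 4:
--         return False
--     recent = history[-4:]
--     fills = [h["fill_sig"] for h in recent] + [current_fmt["fill_sig"]]
--     unique = set(fills)
--     if len(unique) == 2:
--         a, b = list(unique)
--         pattern = [f == a for f in fills]
--         alternating = all(pattern[i] != pattern[i + 1] for i in range(len(pattern) - 1))
--         return alternating
--     return False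
-- ===== SOURCE B (Python) =====
-- def _is_zebra(current_fmt: dict, history: list[dict]) -> bool:
--     """检测是否为斑马纹（交替行底色）"""
--     if len(history) < 4:
--         return False
--     fills = [h["fill_sig"] for h in history[-4:]] + [current_fmt["fill_sig"]]
--
--     def follows(xs, expect, other):
--         # two-state automaton: the next element must be `expect`, then the states swap
--         if not xs:
--             return True
--         return xs[0] == expect and follows(xs[1:], other, expect)
--
--     return fills[0] != fills[1] and follows(fills[2:], fills[0], fills[1])
-- ===== Notes on version B (the rewrite author's own statement) =====
-- stated objective: alternative
-- what changed: A builds a set of the 5-element fill window, requires exactly 2 unique values, maps the window to a boolean pattern and scans adjacent pairs; B instead runs a recursive two-state automaton over the tail of the window, seeded with the first two (required-distinct) fills, consuming one element per step with the expected state swapping.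
import Mathlib
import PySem

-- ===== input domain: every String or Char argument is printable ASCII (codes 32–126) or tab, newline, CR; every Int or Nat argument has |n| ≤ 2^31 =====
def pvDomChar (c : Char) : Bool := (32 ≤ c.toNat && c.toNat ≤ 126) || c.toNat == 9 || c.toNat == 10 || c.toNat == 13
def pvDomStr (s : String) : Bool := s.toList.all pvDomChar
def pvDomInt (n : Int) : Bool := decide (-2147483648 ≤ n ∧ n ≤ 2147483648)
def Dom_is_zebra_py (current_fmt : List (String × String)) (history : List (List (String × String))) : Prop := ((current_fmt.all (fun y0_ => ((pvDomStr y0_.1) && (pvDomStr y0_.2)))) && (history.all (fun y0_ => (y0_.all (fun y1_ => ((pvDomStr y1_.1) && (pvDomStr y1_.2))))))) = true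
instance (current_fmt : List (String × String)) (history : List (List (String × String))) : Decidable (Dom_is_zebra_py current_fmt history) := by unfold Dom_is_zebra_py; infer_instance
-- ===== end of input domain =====

-- B replaces A's set construction + boolean-pattern list + adjacent-pair scan by a recursive
-- two-state automaton consuming the tail of the same 5-element window; objective: alternative, same cost.

-- h["fill_sig"] (none = KeyError, excluded by Pre_)
def fillSig (d : List (String × String)) : Option String :=
  PySem.Dict.get? (PySem.Dict.mk d) "fill_sig"

-- ===== PORT A =====
def is_zebra_py (current_fmt : List (String × String)) (history : List (List (String × String))) : Bool :=
  if history.length < 4 then false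
  else
    let recent := PySem.List.slice history (some (-4)) none
    let fills := recent.map (fun h => (fillSig h).getD "") ++ [(fillSig current_fmt).getD ""]
    let unique := PySem.Set.ofList fills
    if unique.length = 2 then
      -- a, b = list(unique): Python's set-iteration order is not modelled, but the result below is
      -- invariant under swapping a and b (the pattern flips pointwise, alternation is unchanged),
      -- so taking a = first inserted element is result-exact.
      let a := unique.headD ""
      let pattern := fills.map (fun f => f == a)
      (PySem.List.pyRange 0 ((pattern.length : Int) - 1) 1).all
        (fun i => !((PySem.List.pyGet? pattern i).getD false == (PySem.List.pyGet? pattern (i + 1)).getD false))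
    else false

-- ===== PORT B =====
-- the inner `follows(xs, expect, other)` of Source B: two-state automaton, states swap each step
def followsB : List String → String → String → Bool
  | [], _, _ => true
  | z :: rest, expect, other => z == expect && followsB rest other expect

def is_zebra_py_alt (current_fmt : List (String × String)) (history : List (List (String × String))) : Bool :=
  if history.length < 4 then false
  else
    let fills := (history.drop (history.length - 4)).map (fun h => (fillSig h).getD "") ++ [(fillSig current_fmt).getD ""]
    let g := fun i => (PySem.List.pyGet? fills i).getD ""
    !(g 0 == g 1) && followsB (PySem.List.slice fills (some 2) none) (g 0) (g 1)

-- ===== PRECONDITION & SPEC =====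
-- Pre_ excludes exactly the KeyError inputs: when the window is reached (len(history) >= 4), the
-- current format and the last four history entries must carry the "fill_sig" key (A raises otherwise).
def Pre_is_zebra_py (current_fmt : List (String × String)) (history : List (List (String × String))) : Prop :=
  history.length < 4 ∨
    ((PySem.Dict.mk current_fmt).contains "fill_sig" = true ∧
     ∀ h ∈ history.drop (history.length - 4), (PySem.Dict.mk h).contains "fill_sig" = true)
instance (current_fmt : List (String × String)) (history : List (List (String × String))) : Decidable (Pre_is_zebra_py current_fmt history) := by unfold Pre_is_zebra_py; infer_instance

def pvWitness_is_zebra_py : (List (String × String)) × (List (List (String × String))) :=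
  ([("fill_sig", "A")],
   [[("fill_sig", "A")], [("fill_sig", "B")], [("fill_sig", "A")], [("fill_sig", "B")]])

def Spec_is_zebra_py (current_fmt : List (String × String)) (history : List (List (String × String))) (out : Bool) : Prop := out = is_zebra_py_alt current_fmt history
instance (current_fmt : List (String × String)) (history : List (List (String × String))) (out : Bool) : Decidable (Spec_is_zebra_py current_fmt history out) := by unfold Spec_is_zebra_py; infer_instance

-- ===== CLAIM (what is proved, stated in full; the proofs are below) =====
def Claim_equal_is_zebra_py : Prop := ∀ (current_fmt : List (String × String)) (history : List (List (String × String))), Dom_is_zebra_py current_fmt history → Pre_is_zebra_py current_fmt history → Spec_is_zebra_py current_fmt history (is_zebra_py current_fmt history)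

-- ===== LEMMAS AND PROOFS =====

-- a foldl of Set.add never changes the head of a nonempty accumulator
theorem foldl_add_head? {α : Type} [BEq α] (l : List α) (s : List α) (hs : s ≠ []) :
    (l.foldl PySem.Set.add s).head? = s.head? := by
  induction l generalizing s with
  | nil => rfl
  | cons y l ih =>
      rw [List.foldl_cons, ih]
      · unfold PySem.Set.add
        split
        · rfl
        · cases s with
          | nil => exact absurd rfl hs
          | cons a t => rfl
      · unfold PySem.Set.add
        split
        · exact hs
        · cases s <;> simp

-- the first element of set(x::xs) (first-occurrence order) is x
theorem head?_ofList {α : Type} [BEq α] (x : α) (xs : List α) :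
    (PySem.Set.ofList (x :: xs)).head? = some x := by
  show (List.foldl PySem.Set.add (PySem.Set.empty.add x) xs).head? = some x
  rw [foldl_add_head? xs (PySem.Set.empty.add x) (by simp [PySem.Set.add, PySem.Set.empty, PySem.Set.contains])]
  rfl

-- the window core of A equals B's automaton run, on any five fill signatures
set_option maxHeartbeats 2000000 in
theorem zebra_core (x0 x1 x2 x3 x4 : String) :
    (let fills := [x0, x1, x2, x3, x4]
     let unique := PySem.Set.ofList fills
     if unique.length = 2 then
       let a := unique.headD ""
       let pattern := fills.map (fun f => f == a)
       (PySem.List.pyRange 0 ((pattern.length : Int) - 1) 1).all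
         (fun i => !((PySem.List.pyGet? pattern i).getD false == (PySem.List.pyGet? pattern (i + 1)).getD false))
     else false)
    = (!(x0 == x1) && followsB [x2, x3, x4] x0 x1) := by
  simp only [List.map, List.length_cons, List.length_nil]
  norm_num [head?_ofList]
  rw [show PySem.List.pyRange 0 4 = [0, 1, 2, 3] from rfl]
  simp only [List.all_cons, List.all_nil, followsB]
  norm_num [PySem.List.pyGet?, PySem.List.pyIdx?]
  simp only [show Int.toNat 2 = 2 from rfl, show Int.toNat 3 = 3 from rfl,
             show Int.toNat 4 = 4 from rfl, List.getElem_cons_succ, List.getElem_cons_zero]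
  by_cases h1 : x1 = x0 <;>
  by_cases h2 : x2 = x0 <;>
  by_cases h3 : x3 = x0 <;>
  by_cases h4 : x4 = x0 <;>
  by_cases h5 : x3 = x1 <;>
  by_cases h6 : x2 = x1 <;>
  by_cases h7 : x4 = x1 <;>
  by_cases h8 : x4 = x3 <;>
  by_cases h9 : x3 = x2 <;>
  by_cases h10 : x4 = x2 <;>
  simp_all [PySem.Set.ofList, PySem.Set.add, PySem.Set.contains, PySem.Set.empty]

-- a list of length four is a four-element literal
theorem exists_four {α : Type} (l : List α) (h : l.length = 4) :
    ∃ a b c d, l = [a, b, c, d] := by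
  match l, h with
  | [a, b, c, d], _ => exact ⟨a, b, c, d, rfl⟩

-- ===== VERDICT (by name: the statement is the Claim_ definition above) =====
theorem is_zebra_py_spec : Claim_equal_is_zebra_py := by
  intro current_fmt history _ _
  unfold Spec_is_zebra_py is_zebra_py is_zebra_py_alt
  by_cases hlen : history.length < 4
  · simp [hlen]
  · rw [if_neg hlen, if_neg hlen]
    rw [PySem.List.slice_from_neg_ofNat history 4 (by omega)]
    obtain ⟨a, b, c, d, hd⟩ :=
      exists_four (history.drop (history.length - 4)) (by simp; omega)
    rw [hd]
    simp only [List.map_cons, List.map_nil, List.cons_append, List.nil_append]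
    have hz := zebra_core ((fillSig a).getD "") ((fillSig b).getD "") ((fillSig c).getD "")
          ((fillSig d).getD "") ((fillSig current_fmt).getD "")
    simp only [List.map_cons, List.map_nil] at hz
    rw [hz]
    rw [show PySem.List.slice
        [((fillSig a).getD ""), ((fillSig b).getD ""), ((fillSig c).getD ""),
         ((fillSig d).getD ""), ((fillSig current_fmt).getD "")] (some 2) none
      = [((fillSig c).getD ""), ((fillSig d).getD ""), ((fillSig current_fmt).getD "")] from by
        rw [show (2:Int) = ((2:Nat):Int) from rfl, PySem.List.slice_from_natCast]
        rfl]
    norm_num [PySem.List.pyGet?, PySem.List.pyIdx?]
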